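-- pv_equiv track=rewrite | github.com/diya11patel/code_assistant | langugae_processors/laravel_processor.py | _extract_block_with_braces
-- ===== SOURCE A (Python) =====
-- def _extract_block_with_braces(text_content: str, match_start_offset: int) -> tuple[str | None, int]:
--     """
--     Tries to extract a code block enclosed in curly braces.
--     Starts searching for the first '{' at or after match_start_offset.
--     Returns the block content (including braces) and the end offset in the original text_content.
--     NOTE: This is a simplified implementation and can be fooled by braces in comments or strings.
--     """
--     try:
--         open_brace_index = text_content.index('{', match_start_offset)
--     except ValueError:
--         return None, -1 # No opening brace found
--
--     brace_level = 1
--     current_pos = open_brace_index + 1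
--     content_lines = text_content.splitlines()
--
--     while current_pos < len(text_content):
--         char = text_content[current_pos]
--         if char == '{':
--             brace_level += 1
--         elif char == '}':
--             brace_level -= 1
--             if brace_level == 0:
--                 block_text = text_content[open_brace_index : current_pos + 1]
--                 return block_text, current_pos + 1
--         current_pos += 1
--     return None, -1 # Unmatched brace
-- ===== SOURCE B (Python) =====
-- def _extract_block_with_braces(text_content: str, match_start_offset: int) -> tuple[str | None, int]:
--     """Brace-matching by jumping between brace positions with str.find
--     instead of examining every character."""
--     try:
--         open_brace_index = text_content.index('{', match_start_offset)
--     except ValueError: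
--         return None, -1  # No opening brace found
--
--     depth = 1
--     pos = open_brace_index + 1
--     while True:
--         next_close = text_content.find('}', pos)
--         if next_close == -1:
--             return None, -1  # Unmatched brace
--         next_open = text_content.find('{', pos)
--         if next_open != -1 and next_open < next_close:
--             depth += 1
--             pos = next_open + 1
--         else:
--             depth -= 1
--             if depth == 0:
--                 return text_content[open_brace_index:next_close + 1], next_close + 1
--             pos = next_close + 1
-- ===== Notes on version B (the rewrite author's own statement) =====
-- stated objective: alternative
-- what changed: Replaced the per-character while-loop that inspects every character after the opening brace with a loop that uses str.find to jump directly between successive '{' and '}' positions, so only brace positions drive the loop.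
import Mathlib
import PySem

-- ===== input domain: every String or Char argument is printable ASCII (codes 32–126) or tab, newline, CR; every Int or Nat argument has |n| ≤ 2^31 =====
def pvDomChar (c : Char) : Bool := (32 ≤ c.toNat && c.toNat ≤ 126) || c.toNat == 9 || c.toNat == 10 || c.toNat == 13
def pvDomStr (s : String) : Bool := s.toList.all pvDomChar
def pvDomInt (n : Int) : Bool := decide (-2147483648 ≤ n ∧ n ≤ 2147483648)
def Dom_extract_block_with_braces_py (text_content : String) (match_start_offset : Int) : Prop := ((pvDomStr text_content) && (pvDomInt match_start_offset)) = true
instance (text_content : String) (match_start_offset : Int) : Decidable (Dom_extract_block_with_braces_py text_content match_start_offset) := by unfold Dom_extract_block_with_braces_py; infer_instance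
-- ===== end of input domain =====

-- B replaces A's character-by-character scan with str.find jumps from brace to brace (alternative decomposition, same return value).

-- ===== PORT A =====
-- A's while-loop: visit every character from the '{' onward, tracking brace_level.
def pvLoopA (cs : List Char) (openIdx pos : Nat) (level : Int) : Option String × Int :=
  if h : pos < cs.length then
    if cs[pos] = '{' then pvLoopA cs openIdx (pos + 1) (level + 1)
    else if cs[pos] = '}' then
      if level - 1 = 0 then
        (some (String.ofList (PySem.List.slice cs (some (openIdx : Int)) (some ((pos : Int) + 1)))), (pos : Int) + 1)
      else pvLoopA cs openIdx (pos + 1) (level - 1)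
    else pvLoopA cs openIdx (pos + 1) level
  else (none, -1)
termination_by cs.length - pos

def extract_block_with_braces_py (text_content : String) (match_start_offset : Int) : Option String × Int :=
  let cs := text_content.toList
  let idx := PySem.Chars.findFrom cs ['{'] match_start_offset none
  if idx = -1 then (none, -1)   -- ValueError branch: no opening brace found
  else
    let _content_lines := PySem.Chars.splitlines cs   -- computed and never used, as in A
    pvLoopA cs idx.toNat (idx.toNat + 1) 1

-- ===== PORT B =====
-- B's while-True loop: find the next '}' and next '{' and jump straight there; the fuel
-- argument (cs.length + 1 at the top call) only makes the recursion structural — each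
-- iteration moves pos at least one position to the right, so it is never exhausted.
def pvLoopB (cs : List Char) (openIdx fuel pos : Nat) (depth : Int) : Option String × Int :=
  match fuel with
  | 0 => (none, -1)
  | fuel + 1 =>
    let nc := PySem.Chars.findFrom cs ['}'] (pos : Int) none
    if nc = -1 then (none, -1)   -- unmatched brace
    else
      let no := PySem.Chars.findFrom cs ['{'] (pos : Int) none
      if no ≠ -1 ∧ no < nc then pvLoopB cs openIdx fuel (no.toNat + 1) (depth + 1)
      else if depth - 1 = 0 then
        (some (String.ofList (PySem.List.slice cs (some (openIdx : Int)) (some (nc + 1)))), nc + 1)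
      else pvLoopB cs openIdx fuel (nc.toNat + 1) (depth - 1)

def extract_block_with_braces_py_alt (text_content : String) (match_start_offset : Int) : Option String × Int :=
  let cs := text_content.toList
  let idx := PySem.Chars.findFrom cs ['{'] match_start_offset none
  if idx = -1 then (none, -1)
  else pvLoopB cs idx.toNat (cs.length + 1) (idx.toNat + 1) 1

-- ===== PRECONDITION & SPEC =====
def Spec_extract_block_with_braces_py (text_content : String) (match_start_offset : Int) (out : Option String × Int) : Prop := out = extract_block_with_braces_py_alt text_content match_start_offset
instance (text_content : String) (match_start_offset : Int) (out : Option String × Int) : Decidable (Spec_extract_block_with_braces_py text_content match_start_offset out) := by unfold Spec_extract_block_with_braces_py; infer_instance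

-- ===== CLAIM (what is proved, stated in full; the proofs are below) =====
def Claim_equal_extract_block_with_braces_py : Prop := ∀ (text_content : String) (match_start_offset : Int), Dom_extract_block_with_braces_py text_content match_start_offset → Spec_extract_block_with_braces_py text_content match_start_offset (extract_block_with_braces_py text_content match_start_offset)

-- ===== LEMMAS AND PROOFS =====

-- [c] is a prefix of cs.drop m exactly when cs[m]? = some c
theorem pv_prefix_singleton_drop (cs : List Char) (c : Char) (m : Nat) :
    [c] <+: cs.drop m ↔ cs[m]? = some c := by
  rw [← List.head?_drop]
  constructor
  · rintro ⟨t, ht⟩; rw [← ht]; rfl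
  · intro h
    cases hd : cs.drop m with
    | nil => rw [hd] at h; simp at h
    | cons x t => rw [hd] at h; simp at h; subst h; exact ⟨t, rfl⟩

-- an un-found single character differs from the character at any index of the searched range
theorem pv_getElem_ne_of_not_prefix (cs : List Char) (c : Char) (i : Nat) (hi : i < cs.length)
    (h : ¬ [c] <+: cs.drop i) : cs[i] ≠ c := by
  intro hc
  exact h ((pv_prefix_singleton_drop cs c i).mpr (by rw [List.getElem?_eq_some_iff]; exact ⟨hi, hc⟩))

-- A's loop returns (none, -1) when no '}' remains
theorem pvLoopA_no_close (cs : List Char) (o : Nat) :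
    ∀ pos level, '}' ∉ cs.drop pos → pvLoopA cs o pos level = (none, -1) := by
  have key : ∀ n pos level, cs.length - pos ≤ n → '}' ∉ cs.drop pos →
      pvLoopA cs o pos level = (none, -1) := by
    intro n
    induction n with
    | zero =>
      intro pos level hn _
      rw [pvLoopA]
      simp only [dif_neg (by omega : ¬ pos < cs.length)]
    | succ n ih =>
      intro pos level hn hmem
      rw [pvLoopA]
      by_cases h : pos < cs.length
      · have hdrop : cs.drop pos = cs[pos] :: cs.drop (pos + 1) := (List.getElem_cons_drop h).symm
        have hne : cs[pos] ≠ '}' := by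
          intro hc; apply hmem; rw [hdrop, hc]; exact List.mem_cons_self
        have hmem' : '}' ∉ cs.drop (pos + 1) := by
          intro hc; apply hmem; rw [hdrop]; exact List.mem_cons_of_mem _ hc
        simp only [dif_pos h]
        by_cases hob : cs[pos] = '{'
        · rw [if_pos hob]; exact ih _ _ (by omega) hmem'
        · rw [if_neg hob, if_neg hne]; exact ih _ _ (by omega) hmem'
      · simp only [dif_neg h]
  intro pos level h
  exact key (cs.length - pos) pos level le_rfl h

-- A's loop walks unchanged over a stretch of non-brace characters
theorem pvLoopA_skip (cs : List Char) (o : Nat) :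
    ∀ pos q level, pos ≤ q → q ≤ cs.length →
      (∀ i (h : i < cs.length), pos ≤ i → i < q → cs[i] ≠ '{' ∧ cs[i] ≠ '}') →
      pvLoopA cs o pos level = pvLoopA cs o q level := by
  have key : ∀ n pos q level, q - pos ≤ n → pos ≤ q → q ≤ cs.length →
      (∀ i (h : i < cs.length), pos ≤ i → i < q → cs[i] ≠ '{' ∧ cs[i] ≠ '}') →
      pvLoopA cs o pos level = pvLoopA cs o q level := by
    intro n
    induction n with
    | zero =>
      intro pos q level hn hpq _ _
      have h : pos = q := by omega
      subst h
      rfl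
    | succ n ih =>
      intro pos q level hn hpq hq hmid
      by_cases heq : pos = q
      · rw [heq]
      · have hlt : pos < cs.length := by omega
        have hpair := hmid pos hlt le_rfl (by omega)
        rw [pvLoopA]
        simp only [dif_pos hlt, if_neg hpair.1, if_neg hpair.2]
        exact ih (pos + 1) q level (by omega) (by omega) hq
          (fun i hi h1 h2 => hmid i hi (by omega) h2)
  intro pos q level hpq hq hmid
  exact key (q - pos) pos q level le_rfl hpq hq hmid

-- findFrom with an arbitrary Int start is -1 or agrees with some clamped Nat start
theorem pv_findFrom_any (s sub : List Char) (start : Int) :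
    PySem.Chars.findFrom s sub start none = -1 ∨
    ∃ k : Nat, k ≤ s.length ∧
      PySem.Chars.findFrom s sub start none = PySem.Chars.findFrom s sub (k : Int) none := by
  by_cases hs : (s.length : Int) <
      (if start < 0 then (if start + s.length < 0 then 0 else start + s.length) else start)
  · left
    simp only [PySem.Chars.findFrom]
    split_ifs at * <;> omega
  · right
    set st : Int := if start < 0 then (if start + s.length < 0 then 0 else start + s.length) else start with hst
    have h0 : 0 ≤ st := by rw [hst]; split_ifs <;> omega
    refine ⟨st.toNat, by omega, ?_⟩
    simp only [PySem.Chars.findFrom]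
    have h2 : (st.toNat : Int) = st := Int.toNat_of_nonneg h0
    rw [← hst]
    simp only [h2]
    rw [if_neg (show ¬ st < 0 by omega)]

-- a found index of a nonempty needle lies inside the haystack
theorem pv_findFrom_lt (s : List Char) (c : Char) (start : Int)
    (h : PySem.Chars.findFrom s [c] start none ≠ -1) :
    (PySem.Chars.findFrom s [c] start none).toNat < s.length := by
  rcases pv_findFrom_any s [c] start with h1 | ⟨k, hk, heq⟩
  · exact absurd h1 h
  · rw [heq] at h ⊢
    obtain ⟨-, hpre, -⟩ := PySem.Chars.findFrom_natCast_spec s [c] k hk h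
    have := (pv_prefix_singleton_drop s c _).mp hpre
    exact (List.getElem?_eq_some_iff.mp this).1

-- main loop equivalence: B's brace-to-brace jumps compute exactly A's character walk
theorem pvLoopB_eq_pvLoopA (cs : List Char) (o : Nat) :
    ∀ fuel pos depth, pos ≤ cs.length → cs.length + 1 - pos ≤ fuel →
      pvLoopB cs o fuel pos depth = pvLoopA cs o pos depth := by
  intro fuel
  induction fuel with
  | zero => intro pos depth h1 h2; omega
  | succ fuel ih =>
    intro pos depth hpos hfuel
    rw [pvLoopB]
    by_cases hnc : PySem.Chars.findFrom cs ['}'] (pos : Int) none = -1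
    · rw [if_pos hnc]
      have hninf := (PySem.Chars.findFrom_natCast_eq_neg_one_iff cs ['}'] pos hpos).mp hnc
      have hmem : '}' ∉ cs.drop pos := fun hm => hninf ((List.singleton_infix_iff _ _).mpr hm)
      exact (pvLoopA_no_close cs o pos depth hmem).symm
    · rw [if_neg hnc]
      obtain ⟨hle, hpre, hmin⟩ := PySem.Chars.findFrom_natCast_spec cs ['}'] pos hpos hnc
      set nc := PySem.Chars.findFrom cs ['}'] (pos : Int) none with hncdef
      have hncget := (pv_prefix_singleton_drop cs '}' nc.toNat).mp hpre
      obtain ⟨hnclt, hncval⟩ := List.getElem?_eq_some_iff.mp hncget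
      have hnc0 : 0 ≤ nc := le_trans (by omega) hle
      by_cases hno : PySem.Chars.findFrom cs ['{'] (pos : Int) none ≠ -1 ∧
          PySem.Chars.findFrom cs ['{'] (pos : Int) none < nc
      · rw [if_pos hno]
        obtain ⟨hle2, hpre2, hmin2⟩ := PySem.Chars.findFrom_natCast_spec cs ['{'] pos hpos hno.1
        set no := PySem.Chars.findFrom cs ['{'] (pos : Int) none with hnodef
        have hnoget := (pv_prefix_singleton_drop cs '{' no.toNat).mp hpre2
        obtain ⟨hnolt, hnoval⟩ := List.getElem?_eq_some_iff.mp hnoget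
        have hno0 : 0 ≤ no := le_trans (by omega) hle2
        have hmono : no.toNat < nc.toNat := by omega
        have hposle : pos ≤ no.toNat := by omega
        have hmid : ∀ i (h : i < cs.length), pos ≤ i → i < no.toNat → cs[i] ≠ '{' ∧ cs[i] ≠ '}' := by
          intro i hi h1 h2
          exact ⟨pv_getElem_ne_of_not_prefix cs '{' i hi (hmin2 i h1 h2),
                 pv_getElem_ne_of_not_prefix cs '}' i hi (hmin i h1 (by omega))⟩
        rw [ih (no.toNat + 1) (depth + 1) (by omega) (by omega)]
        rw [pvLoopA_skip cs o pos no.toNat depth hposle (by omega) hmid]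
        conv_rhs => rw [pvLoopA]
        rw [dif_pos hnolt, if_pos hnoval]
      · rw [if_neg hno]
        have hmid : ∀ i (h : i < cs.length), pos ≤ i → i < nc.toNat → cs[i] ≠ '{' ∧ cs[i] ≠ '}' := by
          intro i hi h1 h2
          refine ⟨?_, pv_getElem_ne_of_not_prefix cs '}' i hi (hmin i h1 h2)⟩
          by_cases hnoe : PySem.Chars.findFrom cs ['{'] (pos : Int) none = -1
          · have hninf := (PySem.Chars.findFrom_natCast_eq_neg_one_iff cs ['{'] pos hpos).mp hnoe
            intro hc
            apply hninf
            apply (List.singleton_infix_iff _ _).mpr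
            have : (cs.drop pos)[i - pos]'(by simp; omega) = cs[i] := by
              rw [List.getElem_drop]; congr 1; omega
            rw [← hc, ← this]; exact List.getElem_mem _
          · obtain ⟨hle2, hpre2, hmin2⟩ := PySem.Chars.findFrom_natCast_spec cs ['{'] pos hpos hnoe
            have hge : nc ≤ PySem.Chars.findFrom cs ['{'] (pos : Int) none := by
              by_contra hlt
              exact hno ⟨hnoe, by omega⟩
            exact pv_getElem_ne_of_not_prefix cs '{' i hi (hmin2 i h1 (by omega))
        rw [pvLoopA_skip cs o pos nc.toNat depth (by omega) (by omega) hmid]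
        rw [pvLoopA]
        have hncbr : ¬ (cs[nc.toNat] = '{') := by rw [hncval]; decide
        simp only [dif_pos hnclt, if_neg hncbr, if_pos hncval]
        have hcast : ((nc.toNat : Int)) = nc := Int.toNat_of_nonneg hnc0
        by_cases hd : depth - 1 = 0
        · rw [if_pos hd, if_pos hd, hcast]
        · rw [if_neg hd, if_neg hd]
          rw [ih (nc.toNat + 1) (depth - 1) (by omega) (by omega)]

-- ===== VERDICT (by name: the statement is the Claim_ definition above) =====
theorem extract_block_with_braces_py_spec : Claim_equal_extract_block_with_braces_py := by
  intro text_content match_start_offset _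
  unfold Spec_extract_block_with_braces_py
  simp only [extract_block_with_braces_py, extract_block_with_braces_py_alt]
  by_cases hidx : PySem.Chars.findFrom text_content.toList ['{'] match_start_offset none = -1
  · rw [if_pos hidx, if_pos hidx]
  · rw [if_neg hidx, if_neg hidx]
    have hlt := pv_findFrom_lt text_content.toList '{' match_start_offset hidx
    exact (pvLoopB_eq_pvLoopA text_content.toList _ (text_content.toList.length + 1) _ 1
      (by omega) (by omega)).symm
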